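-- pv_equiv track=rewrite | github.com/eggsforbacon/aoc-2021 | src/hydrothermal_vents.py | count_max_overlaps
-- ===== SOURCE A (Python) =====
-- def count_max_overlaps(diagram):
--     threshold = 2
--     count = 0
--     global_max = threshold
--     for row in diagram:
--         local_max = max(row)
--         if local_max >= threshold:
--             global_max = local_max if local_max > global_max else global_max
--             count += len([elem for elem in row if elem >= threshold])
--     return global_max, count
-- ===== SOURCE B (Python) =====
-- def count_max_overlaps(diagram):
--     cells = sorted((e for row in diagram for e in row), reverse=True)
--     global_max = cells[0] if cells and cells[0] > 2 else 2
--     count = 0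
--     for e in cells:
--         if e < 2:
--             break
--         count += 1
--     return global_max, count
-- ===== Notes on version B (the rewrite author's own statement) =====
-- stated objective: alternative
-- what changed: Replaces A's per-row guarded accumulator loop by sort-then-scan: flatten all cells, sort descending once, take the head (clamped at 2) as the global max, and count by a single scan that breaks at the first cell below 2.
import Mathlib
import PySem

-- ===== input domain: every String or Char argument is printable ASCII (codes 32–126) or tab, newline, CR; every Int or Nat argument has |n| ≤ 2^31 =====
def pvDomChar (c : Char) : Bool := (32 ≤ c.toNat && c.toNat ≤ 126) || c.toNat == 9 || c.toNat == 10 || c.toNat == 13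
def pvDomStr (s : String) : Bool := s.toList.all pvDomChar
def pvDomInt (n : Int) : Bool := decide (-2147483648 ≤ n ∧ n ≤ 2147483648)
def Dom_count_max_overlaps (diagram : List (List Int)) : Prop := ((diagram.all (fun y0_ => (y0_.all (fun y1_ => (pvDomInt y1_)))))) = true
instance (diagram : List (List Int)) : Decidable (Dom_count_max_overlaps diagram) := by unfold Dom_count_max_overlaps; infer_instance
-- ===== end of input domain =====

-- B replaces A's per-row guarded accumulator loop by sort-then-scan over the flattened cells (objective: alternative).

-- ===== PORT A =====
def count_max_overlaps (diagram : List (List Int)) : Int × Int :=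
  diagram.foldl (fun (st : Int × Int) row =>
    let local_max := (PySem.List.max? row (fun y => y)).getD 0   -- max(row); none (ValueError) excluded by Pre_
    if 2 ≤ local_max then
      ((if st.1 < local_max then local_max else st.1),
       st.2 + ((row.filter (fun e => 2 ≤ e)).length : Int))
    else st) (2, 0)

-- ===== PORT B =====
-- 'for e in cells: if e < 2: break; count += 1' as structural recursion
def pvCountDesc : List Int → Int → Int
  | [], acc => acc
  | e :: t, acc => if e < 2 then acc else pvCountDesc t (acc + 1)

def count_max_overlaps_alt (diagram : List (List Int)) : Int × Int :=
  let cells := PySem.List.sorted (diagram.flatMap (fun row => row)) (fun y => y) true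
  let global_max : Int :=
    match cells with
    | [] => 2
    | c :: _ => if 2 < c then c else 2
  (global_max, pvCountDesc cells 0)

-- ===== PRECONDITION & SPEC =====
-- Pre_ excludes diagrams containing an empty row: there A's max(row) raises ValueError.
def Pre_count_max_overlaps (diagram : List (List Int)) : Prop :=
  (diagram.all (fun row => !row.isEmpty)) = true
instance (diagram : List (List Int)) : Decidable (Pre_count_max_overlaps diagram) := by
  unfold Pre_count_max_overlaps; infer_instance
def pvWitness_count_max_overlaps : List (List Int) := [[0, 3], [2, 2]]
def Spec_count_max_overlaps (diagram : List (List Int)) (out : Int × Int) : Prop := out = count_max_overlaps_alt diagram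
instance (diagram : List (List Int)) (out : Int × Int) : Decidable (Spec_count_max_overlaps diagram out) := by unfold Spec_count_max_overlaps; infer_instance

-- ===== CLAIM (what is proved, stated in full; the proofs are below) =====
def Claim_equal_count_max_overlaps : Prop := ∀ (diagram : List (List Int)), Dom_count_max_overlaps diagram → Pre_count_max_overlaps diagram → Spec_count_max_overlaps diagram (count_max_overlaps diagram)

-- ===== LEMMAS AND PROOFS =====

-- max of a nonempty row, as A's port computes it
theorem pv_maxrow_cons (x : Int) (t : List Int) :
    (PySem.List.max? (x :: t) (fun y => y)).getD 0 = t.foldl max x := by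
  rw [PySem.List.max?_id_cons]; rfl

-- every element of a nonempty row is ≤ its max
theorem pv_le_maxrow (row : List Int) (h : row ≠ []) (y : Int) (hy : y ∈ row) :
    y ≤ (PySem.List.max? row (fun y => y)).getD 0 := by
  cases row with
  | nil => exact absurd rfl h
  | cons x t =>
    rw [pv_maxrow_cons]
    rcases List.mem_cons.mp hy with rfl | hy
    · exact (PySem.List.le_foldl_max t y).1
    · exact (PySem.List.le_foldl_max t x).2 y hy

-- A's loop invariant: fold from (gm, c) = (max over row maxima, c + flat count)
theorem pv_loop (rows : List (List Int)) (hne : ∀ row ∈ rows, row ≠ []) :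
    ∀ (gm c : Int), 2 ≤ gm →
    rows.foldl (fun (st : Int × Int) row =>
      let local_max := (PySem.List.max? row (fun y => y)).getD 0
      if 2 ≤ local_max then
        ((if st.1 < local_max then local_max else st.1),
         st.2 + ((row.filter (fun e => 2 ≤ e)).length : Int))
      else st) (gm, c)
    = ((rows.map (fun row => (PySem.List.max? row (fun y => y)).getD 0)).foldl max gm,
       c + ((rows.flatMap (fun row => row.filter (fun e => 2 ≤ e))).length : Int)) := by
  induction rows with
  | nil => intro gm c _; simp
  | cons row rs ih =>
    intro gm c hgm
    have hrow : row ≠ [] := hne row (List.mem_cons_self ..)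
    have hrs : ∀ r ∈ rs, r ≠ [] := fun r hr => hne r (List.mem_cons_of_mem _ hr)
    simp only [List.foldl_cons, List.map_cons, List.flatMap_cons, List.length_append]
    set lm := (PySem.List.max? row (fun y => y)).getD 0 with hlm
    by_cases h2 : 2 ≤ lm
    · simp only [h2, if_pos]
      rw [ih hrs _ _ (by split <;> omega)]
      have hmax : max gm lm = if gm < lm then lm else gm := by
        rw [max_def]; split_ifs <;> omega
      rw [hmax]; push_cast; ring_nf
    · simp only [h2, if_neg, not_false_iff]
      rw [ih hrs _ _ hgm]
      have hmax : max gm lm = gm := max_eq_left (by omega)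
      have hfil : row.filter (fun e => decide (2 ≤ e)) = [] := by
        rw [List.filter_eq_nil_iff]
        intro y hy
        have := pv_le_maxrow row hrow y hy
        simp only [decide_eq_true_eq]
        omega
      rw [hmax]; simp [hfil]

-- foldl max commutes with a pre-maximized element
theorem pv_foldl_max_comm (t : List Int) : ∀ (a b : Int), t.foldl max (max a b) = max a (t.foldl max b) := by
  induction t with
  | nil => intro a b; rfl
  | cons x s ih =>
    intro a b
    simp only [List.foldl_cons]
    rw [max_assoc, ih]

-- max over the row maxima = max over the flattened cells (rows nonempty)
theorem pv_maxes_eq_flat (rows : List (List Int)) (hne : ∀ row ∈ rows, row ≠ []) :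
    ∀ (gm : Int),
    (rows.map (fun row => (PySem.List.max? row (fun y => y)).getD 0)).foldl max gm
      = (rows.flatMap (fun row => row)).foldl max gm := by
  induction rows with
  | nil => intro gm; rfl
  | cons row rs ih =>
    intro gm
    have hrs : ∀ r ∈ rs, r ≠ [] := fun r hr => hne r (List.mem_cons_of_mem _ hr)
    cases row with
    | nil => exact absurd rfl (hne [] (List.mem_cons_self ..))
    | cons x t =>
      simp only [List.map_cons, List.foldl_cons, List.flatMap_cons, List.foldl_append, List.cons_append]
      rw [ih hrs, pv_maxrow_cons, pv_foldl_max_comm t gm x, pv_foldl_max_comm]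

-- on a descending list, the break-loop counts exactly the elements ≥ 2
theorem pv_countDesc (cells : List Int) (hs : cells.Pairwise (fun a b => b ≤ a)) :
    ∀ acc : Int, pvCountDesc cells acc = acc + (cells.countP (fun e => 2 ≤ e) : Int) := by
  induction cells with
  | nil => intro acc; simp [pvCountDesc]
  | cons e t ih =>
    intro acc
    have hp := List.pairwise_cons.mp hs
    by_cases h : e < 2
    · have h0 : t.countP (fun x => 2 ≤ x) = 0 := by
        rw [List.countP_eq_zero]
        intro y hy
        have := hp.1 y hy
        simp only [decide_eq_true_eq]; omega
      simp [pvCountDesc, h, h0]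
    · rw [show pvCountDesc (e :: t) acc = pvCountDesc t (acc + 1) by simp [pvCountDesc, h]]
      rw [ih hp.2]
      simp [(by omega : (2:Int) ≤ e)]
      omega

-- ===== VERDICT (by name: the statement is the Claim_ definition above) =====
theorem count_max_overlaps_spec : Claim_equal_count_max_overlaps := by
  intro diagram _ hpre
  unfold Spec_count_max_overlaps count_max_overlaps count_max_overlaps_alt
  have hne : ∀ row ∈ diagram, row ≠ [] := by
    intro row hr
    have := List.all_eq_true.mp hpre row hr
    simpa [List.isEmpty_iff] using this
  rw [pv_loop diagram hne 2 0 le_rfl, pv_maxes_eq_flat diagram hne 2]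
  set L := diagram.flatMap (fun row => row) with hL
  set S := PySem.List.sorted L (fun y => y) true with hS
  have hperm : S.Perm L := PySem.List.sorted_perm ..
  have hdesc : S.Pairwise (fun a b => b ≤ a) := by
    have := PySem.List.sorted_pairwise_rev (xs := L) (key := fun y => y)
    simpa using this
  -- count component
  have hcount : pvCountDesc S 0 = ((diagram.flatMap (fun row => row.filter (fun e => 2 ≤ e))).length : Int) := by
    rw [pv_countDesc S hdesc 0, hperm.countP_eq, hL]
    simp [List.countP_eq_length_filter, List.flatMap_def]
  -- max component
  have hmaxeq : L.foldl max 2 = (match S with | [] => (2:Int) | c :: _ => if 2 < c then c else 2) := by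
    cases hScases : S with
    | nil =>
      have hnil : PySem.List.sorted L (fun y => y) true = [] := hS.symm.trans hScases
      have : L = [] := (PySem.List.sorted_eq_nil_iff (xs := L) (key := fun y => y) (rev := true)).mp hnil
      simp [this]
    | cons c t =>
      have hmem : c ∈ L := hperm.mem_iff.mp (hScases ▸ List.mem_cons_self ..)
      have hle : ∀ y ∈ L, y ≤ c := by
        intro y hy
        have := PySem.List.key_head_sorted_rev_ge (xs := L) (key := fun y => y) (hS.symm.trans hScases) y hy
        simpa using this
      have h1 : L.foldl max 2 ≤ max 2 c := by
        rcases PySem.List.foldl_max_mem L 2 with h | h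
        · omega
        · have := hle _ h; omega
      have h2 : max 2 c ≤ L.foldl max 2 := by
        have ha := (PySem.List.le_foldl_max L 2).1
        have hb := (PySem.List.le_foldl_max L 2).2 c hmem
        omega
      have : L.foldl max 2 = max 2 c := le_antisymm h1 h2
      rw [this]
      simp only [max_def]
      split_ifs <;> omega
  simp only [hmaxeq, hcount, zero_add]
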